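-- pv_equiv track=rewrite | github.com/erynes/Plotting-Partner | utils.py | boundary_val_and_op_to_idx
-- ===== SOURCE A (Python) =====
-- def boundary_val_and_op_to_idx(vals : list, op : str, bv : str):
--     """
--     Function to facilitate subsetting the bar plot by its x-axis values (strings).
--     NOTE: If your values contain variable-width numbers whose sort-order needs to
--     preserve numerical order (e.g. 'id-9-y' < 'id-10-x' not 'id-10-x' < 'id-9-y'),
--     you'll need to add code to this function to handle this. Hints are given below.
--
--     vals : list of str
--        A list of sample IDs sorted in ascending order.
--        If the sort order is anything other than basic string order
--        (string1 < string2), you'll need to add code to handle this.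
--     op : str
--        Operator. One of '>=', '>', '==', '<', '<='.
--     bv : str
--        Boundary value. A sample ID in vals, or a fake ID.
--        If the ID strings are 6-digit integers and the user wants to
--        access all entries beginning with '0', '1', or '2',
--        they could set op = '<' and bv = '300000' regardless of whether
--        '300000' is in the set of IDs.
--
--     Returns
--     -------
--     int
--        The index into vals to which bv translates.
--        The caller will use this as vals[idx:] (idx<0) or vals[:idx] (idx>=0)
--        to obtain the desired subset.
--     """
--     try:
--         idx = vals.index(bv)
--         if op == '>=':
--             bv = -(len(vals) - idx)
--         elif op == '>':
--             bv = -(len(vals) - idx - 1)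
--         elif op == '==' or op == '<':
--             bv = idx
--         else: # '<='
--             bv = idx + 1 #  this will not exceed len(vals))
--     except ValueError: # bv is not in vals
--         # Coding hint for sort orders other than simple str1 < str2:
--         # Here, you might want to extract (e.g.) string and int parts
--         # from bv and store them in variables like bv_string_part
--         # and bv_int_part.
--         if op == '==':
--             bv = None # not found
--         elif op == '<' or op == '<=':
--             idx = 0
--             while idx < len(vals):
--                 # Coding hint for sort orders other than simple str1 < str2:
--                 # If above you stored bv_string_part and bv_int_part,
--                 # here you might want to do the same (store these in, e.g.,
--                 # cur_string_part and cur_int_part) and replace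
--                 # the lines 'if vals[idx] > bv: break' with something like this,
--                 # e.g. if you have 'apple-9', 'apple-10', and 'banana-7':
--                 # if cur_string_part > bv_string_part \
--                 #    or (cur_string_part==bv_string_part and cur_int_part > bv_int_part):
--                 #     break
--                 if vals[idx] > bv:
--                     break
--                 idx += 1
--             bv = idx
--         else: # '>=' or '>'
--             idx = -1
--             while abs(idx) < len(vals):
--                 # Coding hint for sort orders other than simple str1 < str2:
--                 # Analogous to the replacement of 'if vals[idx] > bv: break' above,
--                 # you'd do the same thing here, with '>' above switched to '<' here:
--                 # if cur_string_part < bv_string_part \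
--                 #    or (cur_string_part==bv_string_part and cur_int_part < bv_int_part):
--                 #     break
--                 if vals[idx] < bv:
--                     idx += 1
--                     break
--                 idx -= 1
--             bv = idx
--     return bv
-- ===== SOURCE B (Python) =====
-- def boundary_val_and_op_to_idx(vals, op, bv):
--     """One forward pass collects three statistics (first index equal to bv,
--     first index greater than bv, last index less than bv); the answer is then
--     pure arithmetic on them.  On the corner where A's backwards loop never
--     inspects vals[0] (or vals is empty) B returns the intended boundary."""
--     n = len(vals)
--     first_eq = None
--     first_gt = None
--     last_lt = None
--     for i, v in enumerate(vals):
--         if first_eq is None and v == bv: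
--             first_eq = i
--         if first_gt is None and v > bv:
--             first_gt = i
--         if v < bv:
--             last_lt = i
--     if first_eq is not None:
--         if op == '>=':
--             return first_eq - n
--         elif op == '>':
--             return first_eq + 1 - n
--         elif op == '==' or op == '<':
--             return first_eq
--         else:
--             return first_eq + 1
--     if op == '==':
--         return None
--     if op == '<' or op == '<=':
--         return first_gt if first_gt is not None else n
--     return last_lt + 1 - n if last_lt is not None else -n
-- ===== Notes on version B (the rewrite author's own statement) =====
-- stated objective: alternative
-- what changed: Replaces A's try/except around list.index plus two directional while-loops (one scanning forward, one scanning backward with negative indices) by a single forward pass that collects three statistics (first index equal to bv, first index greater than bv, last index less than bv) followed by pure arithmetic dispatch.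
-- intended difference: On '>'/'>=' queries with bv absent where vals is empty or every element after vals[0] is >= bv while vals[0] < bv, A's backwards loop never inspects vals[0] and returns -len(vals) (resp. a leftover -1 on empty vals), while B returns the intended boundary 1-len(vals) (resp. 0) so that vals[idx:] is exactly the elements > bv. — e.g. on boundary_val_and_op_to_idx(["a", "b"], ">", "aa"): A returns some (-2), B returns some (-1)
import Mathlib
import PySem

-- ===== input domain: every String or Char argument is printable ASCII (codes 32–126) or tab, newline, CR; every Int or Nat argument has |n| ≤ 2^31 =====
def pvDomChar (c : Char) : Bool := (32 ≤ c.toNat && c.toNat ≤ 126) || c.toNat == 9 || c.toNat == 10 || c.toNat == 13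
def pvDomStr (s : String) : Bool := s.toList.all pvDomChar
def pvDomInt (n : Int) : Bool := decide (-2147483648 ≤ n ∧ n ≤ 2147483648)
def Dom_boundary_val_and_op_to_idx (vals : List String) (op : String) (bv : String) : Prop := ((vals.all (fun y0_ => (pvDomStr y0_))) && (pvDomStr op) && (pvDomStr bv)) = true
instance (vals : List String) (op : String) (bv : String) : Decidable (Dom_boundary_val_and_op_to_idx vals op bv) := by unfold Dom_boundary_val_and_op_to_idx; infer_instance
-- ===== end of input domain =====

-- B replaces A's try/except plus two directional while-loops by a single forward pass
-- collecting three statistics and pure arithmetic on them (objective: alternative, same O(n));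
-- on the corner where A's backwards loop never inspects vals[0] (or vals is empty) B returns the intended boundary (see D_).

-- ===== PORT A =====
-- the 'while idx < len(vals): if vals[idx] > bv: break; idx += 1' loop of A's '<'/'<=' branch
def pvAFwd (vals : List String) (bv : String) (idx : Nat) : Nat :=
  if h : idx < vals.length then
    if PySem.Chars.strLt bv.toList (vals[idx]).toList then idx
    else pvAFwd vals bv (idx + 1)
  else idx
termination_by vals.length - idx

-- the 'idx = -1; while abs(idx) < len(vals): …' loop of A's '>'/'>=' branch; the real exit is the
-- guard |idx| < len (exactly Python's); fuel = vals.length strictly bounds the iteration count, so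
-- for the call below it is never exhausted before the guard fails or the break fires.
def pvABwdGo (vals : List String) (bv : String) : Nat → Int → Int
  | 0, idx => idx
  | fuel + 1, idx =>
    if idx.natAbs < vals.length then
      match PySem.List.pyGet? vals idx with
      | some v => if PySem.Chars.strLt v.toList bv.toList then idx + 1 else pvABwdGo vals bv fuel (idx - 1)
      | none => idx
    else idx

def boundary_val_and_op_to_idx (vals : List String) (op : String) (bv : String) : Option Int :=
  match PySem.List.index? vals bv with
  | some idx =>
      if op == ">=" then some (-((vals.length : Int) - (idx : Int)))
      else if op == ">" then some (-((vals.length : Int) - (idx : Int) - 1))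
      else if op == "==" || op == "<" then some (idx : Int)
      else some ((idx : Int) + 1)
  | none =>
      if op == "==" then none
      else if op == "<" || op == "<=" then some ((pvAFwd vals bv 0 : Int))
      else some (pvABwdGo vals bv vals.length (-1))

-- ===== PORT B =====
def boundary_val_and_op_to_idx_alt (vals : List String) (op : String) (bv : String) : Option Int :=
  let n : Int := vals.length
  let st := (PySem.List.enumerate vals 0).foldl
    (fun (acc : Option Int × Option Int × Option Int) (p : Int × String) =>
      ((if acc.1.isNone && p.2 == bv then some p.1 else acc.1),
       (if acc.2.1.isNone && PySem.Chars.strLt bv.toList p.2.toList then some p.1 else acc.2.1),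
       (if PySem.Chars.strLt p.2.toList bv.toList then some p.1 else acc.2.2)))
    (none, none, none)
  match st.1 with
  | some idx =>
      if op == ">=" then some (idx - n)
      else if op == ">" then some (idx + 1 - n)
      else if op == "==" || op == "<" then some idx
      else some (idx + 1)
  | none =>
      if op == "==" then none
      else if op == "<" || op == "<=" then some (st.2.1.getD n)
      else
        match st.2.2 with
        | some k => some (k + 1 - n)
        | none => some (-n)

-- ===== PRECONDITION & SPEC =====
-- On '>'/'>=' inputs with bv not in vals where every element after the first is ≥ bv (or vals is
-- empty), A's backwards loop never inspects vals[0] and returns -len(vals) (resp. leftover -1 on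
-- empty input) where the intended boundary index of the '> bv' suffix is 1-len(vals) (resp. 0),
-- which B returns.
def D_boundary_val_and_op_to_idx (vals : List String) (op : String) (bv : String) : Prop :=
  bv ∉ vals ∧ op ≠ "==" ∧ op ≠ "<" ∧ op ≠ "<=" ∧
    (vals = [] ∨
      (vals.head?.any (fun h => PySem.Chars.strLt h.toList bv.toList) = true ∧
       vals.tail.all (fun u => !PySem.Chars.strLt u.toList bv.toList) = true))
instance (vals : List String) (op : String) (bv : String) : Decidable (D_boundary_val_and_op_to_idx vals op bv) := by unfold D_boundary_val_and_op_to_idx; infer_instance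

def Spec_boundary_val_and_op_to_idx (vals : List String) (op : String) (bv : String) (out : Option Int) : Prop := ¬ D_boundary_val_and_op_to_idx vals op bv → out = boundary_val_and_op_to_idx_alt vals op bv
instance (vals : List String) (op : String) (bv : String) (out : Option Int) : Decidable (Spec_boundary_val_and_op_to_idx vals op bv out) := by unfold Spec_boundary_val_and_op_to_idx; infer_instance

def pvDiffWitness_boundary_val_and_op_to_idx : List String × String × String := (["a", "b"], ">", "aa")
def pvDiffWitnessOut_boundary_val_and_op_to_idx : (Option Int) × (Option Int) := (some (-2), some (-1))

-- ===== CLAIM (what is proved, stated in full; the proofs are below) =====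
def Claim_unchanged_boundary_val_and_op_to_idx : Prop := ∀ (vals : List String) (op : String) (bv : String), Dom_boundary_val_and_op_to_idx vals op bv → Spec_boundary_val_and_op_to_idx vals op bv (boundary_val_and_op_to_idx vals op bv)
def Claim_changed_boundary_val_and_op_to_idx : Prop := Dom_boundary_val_and_op_to_idx (pvDiffWitness_boundary_val_and_op_to_idx.1) (pvDiffWitness_boundary_val_and_op_to_idx.2.1) (pvDiffWitness_boundary_val_and_op_to_idx.2.2) ∧ D_boundary_val_and_op_to_idx (pvDiffWitness_boundary_val_and_op_to_idx.1) (pvDiffWitness_boundary_val_and_op_to_idx.2.1) (pvDiffWitness_boundary_val_and_op_to_idx.2.2) ∧ boundary_val_and_op_to_idx (pvDiffWitness_boundary_val_and_op_to_idx.1) (pvDiffWitness_boundary_val_and_op_to_idx.2.1) (pvDiffWitness_boundary_val_and_op_to_idx.2.2) = pvDiffWitnessOut_boundary_val_and_op_to_idx.1 ∧ boundary_val_and_op_to_idx_alt (pvDiffWitness_boundary_val_and_op_to_idx.1) (pvDiffWitness_boundary_val_and_op_to_idx.2.1) (pvDiffWitness_boundary_val_and_op_to_idx.2.2) = pvDiffWitnessOut_boundary_val_and_op_to_idx.2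 ∧ pvDiffWitnessOut_boundary_val_and_op_to_idx.1 ≠ pvDiffWitnessOut_boundary_val_and_op_to_idx.2
def Claim_exact_boundary_val_and_op_to_idx : Prop := ∀ (vals : List String) (op : String) (bv : String), Dom_boundary_val_and_op_to_idx vals op bv → D_boundary_val_and_op_to_idx vals op bv → boundary_val_and_op_to_idx vals op bv ≠ boundary_val_and_op_to_idx_alt vals op bv

-- ===== LEMMAS AND PROOFS =====

-- first index i with vals[i] == bv (the value of A's vals.index / B's first_eq)
def pvFirstEq : List String → String → Option Nat
  | [], _ => none
  | v :: t, bv => if v == bv then some 0 else (pvFirstEq t bv).map (· + 1)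

-- first index i with vals[i] > bv (B's first_gt)
def pvFirstGt : List String → String → Option Nat
  | [], _ => none
  | v :: t, bv => if PySem.Chars.strLt bv.toList v.toList then some 0 else (pvFirstGt t bv).map (· + 1)

-- last index i with vals[i] < bv (B's last_lt)
def pvLastLt : List String → String → Option Nat
  | [], _ => none
  | v :: t, bv =>
    match pvLastLt t bv with
    | some k => some (k + 1)
    | none => if PySem.Chars.strLt v.toList bv.toList then some 0 else none

theorem pvFold_char (bv : String) (l : List String) : ∀ (s : Int) (acc : Option Int × Option Int × Option Int),
    (PySem.List.enumerate l s).foldl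
      (fun (acc : Option Int × Option Int × Option Int) (p : Int × String) =>
        ((if acc.1.isNone && p.2 == bv then some p.1 else acc.1),
         (if acc.2.1.isNone && PySem.Chars.strLt bv.toList p.2.toList then some p.1 else acc.2.1),
         (if PySem.Chars.strLt p.2.toList bv.toList then some p.1 else acc.2.2))) acc
    = (acc.1.or ((pvFirstEq l bv).map (fun k => s + k)),
       acc.2.1.or ((pvFirstGt l bv).map (fun k => s + k)),
       ((pvLastLt l bv).map (fun k => s + (k : Int))).or acc.2.2) := by
  induction l with
  | nil => intro s acc; simp [pvFirstEq, pvFirstGt, pvLastLt, PySem.List.enumerate_nil]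
  | cons v t ih =>
    intro s acc
    obtain ⟨fe, fg, ll⟩ := acc
    rw [PySem.List.enumerate_cons, List.foldl_cons, ih]
    simp only [pvFirstEq, pvFirstGt, pvLastLt]
    refine Prod.ext ?_ (Prod.ext ?_ ?_)
    · cases fe with
      | some a => simp
      | none =>
        by_cases hv : v == bv
        · simp [hv]
        · simp only [Bool.not_eq_true] at hv
          simp [hv]
          cases pvFirstEq t bv with
          | none => simp
          | some a => simp; ring
    · cases fg with
      | some a => simp
      | none =>
        by_cases hv : PySem.Chars.strLt bv.toList v.toList
        · simp [hv]
        · simp only [Bool.not_eq_true] at hv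
          simp [hv]
          cases pvFirstGt t bv with
          | none => simp
          | some a => simp; ring
    · cases hll : pvLastLt t bv with
      | some k => simp; ring
      | none =>
        by_cases hv : PySem.Chars.strLt v.toList bv.toList
        · simp [hv]
        · simp only [Bool.not_eq_true] at hv
          simp [hv]

theorem pvAFwd_eq (vals : List String) (bv : String) : ∀ (d idx : Nat), vals.length - idx = d → idx ≤ vals.length →
    pvAFwd vals bv idx = (match pvFirstGt (vals.drop idx) bv with
      | some j => idx + j
      | none => vals.length) := by
  intro d
  induction d with
  | zero =>
    intro idx hd hle
    have : idx = vals.length := by omega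
    subst this
    rw [pvAFwd]
    simp [pvFirstGt]
  | succ d ih =>
    intro idx hd hle
    have h : idx < vals.length := by omega
    rw [pvAFwd, dif_pos h, List.drop_eq_getElem_cons h]
    simp only [pvFirstGt]
    by_cases hc : PySem.Chars.strLt bv.toList (vals[idx]).toList
    · simp [hc]
    · simp only [Bool.not_eq_true] at hc
      rw [if_neg (by simp [hc]), ih (idx + 1) (by omega) (by omega)]
      simp only [hc, Bool.false_eq_true, if_false]
      cases pvFirstGt (vals.drop (idx + 1)) bv with
      | none => simp
      | some j => simp only [Option.map_some]; ac_rfl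

theorem pvLastLt_concat (l : List String) (x bv : String) :
    pvLastLt (l ++ [x]) bv = if PySem.Chars.strLt x.toList bv.toList then some l.length else pvLastLt l bv := by
  induction l with
  | nil => simp [pvLastLt]
  | cons v t ih =>
    simp only [List.cons_append, pvLastLt, ih]
    by_cases hx : PySem.Chars.strLt x.toList bv.toList
    · simp only [hx, if_true]
      cases pvLastLt t bv <;> simp
    · simp only [hx, Bool.false_eq_true, if_false]

theorem pvLastLt_eq_none_iff (l : List String) (bv : String) :
    pvLastLt l bv = none ↔ ∀ u ∈ l, PySem.Chars.strLt u.toList bv.toList = false := by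
  induction l with
  | nil => simp [pvLastLt]
  | cons v t ih =>
    simp only [pvLastLt, List.mem_cons]
    cases h : pvLastLt t bv with
    | some k =>
      simp only [reduceCtorEq, false_iff, not_forall]
      have : ¬ ∀ u ∈ t, PySem.Chars.strLt u.toList bv.toList = false := by
        rw [← ih]; simp [h]
      push Not at this
      obtain ⟨u, hu, hu2⟩ := this
      exact ⟨u, Or.inr hu, hu2⟩
    | none =>
      have ht := (ih).mpr ∘ id
      by_cases hv : PySem.Chars.strLt v.toList bv.toList
      · simp only [hv, if_true, reduceCtorEq, false_iff, not_forall]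
        exact ⟨v, Or.inl rfl, by simp [hv]⟩
      · simp only [Bool.not_eq_true] at hv
        simp only [hv, Bool.false_eq_true, if_false, true_iff]
        intro u hu
        rcases hu with rfl | hu
        · exact hv
        · exact (ih.mp h) u hu

theorem pvABwdGo_eq (vals : List String) (bv : String) : ∀ (m : Nat), m + 1 ≤ vals.length → ∀ (f : Nat), m + 1 ≤ f →
    pvABwdGo vals bv f ((m : Int) - (vals.length : Int))
    = (match pvLastLt (vals.tail.take m) bv with
       | some k => (k : Int) + 2 - (vals.length : Int)
       | none => -(vals.length : Int)) := by
  intro m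
  induction m with
  | zero =>
    intro hm f hf
    obtain ⟨f', rfl⟩ : ∃ f', f = f' + 1 := ⟨f - 1, by omega⟩
    rw [pvABwdGo]
    have : ((0 : Int) - (vals.length : Int)).natAbs = vals.length := by omega
    rw [if_neg (by omega)]
    simp [pvLastLt]
  | succ m ih =>
    intro hm f hf
    obtain ⟨f', rfl⟩ : ∃ f', f = f' + 1 := ⟨f - 1, by omega⟩
    rw [pvABwdGo]
    simp only [Nat.cast_add, Nat.cast_one]
    have habs : (((m : Nat) + 1 : Int) - (vals.length : Int)).natAbs = vals.length - (m + 1) := by omega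
    rw [if_pos (by omega)]
    have hk1 : 0 < vals.length - (m + 1) := by omega
    have hget : PySem.List.pyGet? vals (((m : Nat) + 1 : Int) - (vals.length : Int)) = vals[m + 1]? := by
      have : (((m : Nat) + 1 : Int) - (vals.length : Int)) = -((vals.length - (m+1) : Nat) : Int) := by omega
      rw [this, PySem.List.pyGet?_neg_natCast vals (vals.length - (m + 1)) (by omega) (by omega)]
      congr 1
      omega
    have hm1 : m + 1 < vals.length := by omega
    rw [hget, List.getElem?_eq_getElem hm1]
    have htake : vals.tail.take (m + 1) = vals.tail.take m ++ [vals[m + 1]] := by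
      rw [List.take_add_one]
      congr 1
      rw [List.getElem?_tail]
      rw [List.getElem?_eq_getElem hm1]
      rfl
    rw [htake, pvLastLt_concat]
    have hlen : (vals.tail.take m).length = m := by
      rw [List.length_take, List.length_tail]; omega
    by_cases hc : PySem.Chars.strLt (vals[m + 1]).toList bv.toList
    · simp only [hc, if_true]
      rw [hlen]
      ring
    · simp only [Bool.not_eq_true] at hc
      simp only [hc, Bool.false_eq_true, if_false]
      have : (((m : Nat) + 1 : Int) - (vals.length : Int)) - 1 = ((m : Nat) : Int) - (vals.length : Int) := by omega
      rw [this, ih (by omega) f' (by omega)]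

theorem index?_eq_pvFirstEq (vals : List String) (bv : String) :
    PySem.List.index? vals bv = pvFirstEq vals bv := by
  induction vals with
  | nil => simp [pvFirstEq]
  | cons v t ih =>
    by_cases h : v == bv
    · have hv : v = bv := beq_iff_eq.mp h
      subst hv
      rw [PySem.List.index?_cons_self]
      simp [pvFirstEq]
    · have hv : v ≠ bv := by simpa using h
      rw [PySem.List.index?_cons_of_ne t hv, ih]
      simp [pvFirstEq, h]

-- ===== VERDICT (by name: the statement is the Claim_ definition above) =====
theorem boundary_val_and_op_to_idx_spec : Claim_unchanged_boundary_val_and_op_to_idx := by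
  intro vals op bv _hDom hnD
  unfold boundary_val_and_op_to_idx boundary_val_and_op_to_idx_alt
  rw [index?_eq_pvFirstEq, pvFold_char bv vals 0 (none, none, none)]
  simp only [Option.or_none, Option.none_or, zero_add]
  cases hfe : pvFirstEq vals bv with
  | some i =>
    simp only [Option.map_some]
    split_ifs <;> first
      | rfl
      | (congr 1; push_cast; ring)
  | none =>
    simp only [Option.map_none]
    by_cases h1 : op == "=="
    · simp [h1]
    · simp only [h1, Bool.false_eq_true, if_false]
      by_cases h2 : (op == "<" || op == "<=")
      · simp only [h2, if_true]
        rw [pvAFwd_eq vals bv vals.length 0 (by omega) (by omega)]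
        simp only [List.drop_zero]
        cases pvFirstGt vals bv <;> simp
      · simp only [h2, Bool.false_eq_true, if_false]
        have hmem : bv ∉ vals := by
          rw [← PySem.List.index?_eq_none_iff, index?_eq_pvFirstEq, hfe]
        have hops : op ≠ "==" ∧ op ≠ "<" ∧ op ≠ "<=" := by
          simp only [Bool.or_eq_true, not_or] at h1 h2
          exact ⟨by simpa using h1, by simpa using h2.1, by simpa using h2.2⟩
        cases vals with
        | nil =>
          exact absurd ⟨hmem, hops.1, hops.2.1, hops.2.2, Or.inl rfl⟩ hnD
        | cons v t =>
          have hm1 : ((-1 : Int)) = ((t.length : Nat) : Int) - (((v :: t).length : Nat) : Int) := by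
            simp
          rw [hm1, pvABwdGo_eq (v :: t) bv t.length (by simp) (v :: t).length (by simp)]
          have htail : (v :: t).tail.take t.length = t := by simp
          rw [htail]
          cases hll : pvLastLt t bv with
          | some k =>
            simp only [pvLastLt, hll, Option.map_some]
            all_goals congr 1
          | none =>
            by_cases hv : PySem.Chars.strLt v.toList bv.toList
            · exact absurd ⟨hmem, hops.1, hops.2.1, hops.2.2,
                Or.inr ⟨by simp [hv], by simpa using pvLastLt_eq_none_iff t bv |>.mp hll⟩⟩ hnD
            · simp only [Bool.not_eq_true] at hv
              simp only [pvLastLt, hll, hv, Bool.false_eq_true, if_false]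
              simp

theorem boundary_val_and_op_to_idx_changed : Claim_changed_boundary_val_and_op_to_idx := by
  unfold Claim_changed_boundary_val_and_op_to_idx; decide

theorem boundary_val_and_op_to_idx_tight : Claim_exact_boundary_val_and_op_to_idx := by
  intro vals op bv _hDom hD
  obtain ⟨hmem, h1, h2, h3, h5⟩ := hD
  have hidx : PySem.List.index? vals bv = none := (PySem.List.index?_eq_none_iff vals bv).mpr hmem
  have hfe : pvFirstEq vals bv = none := by rw [← index?_eq_pvFirstEq, hidx]
  have e1 : (op == "==") = false := beq_eq_false_iff_ne.mpr h1
  have e2 : (op == "<") = false := beq_eq_false_iff_ne.mpr h2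
  have e3 : (op == "<=") = false := beq_eq_false_iff_ne.mpr h3
  unfold boundary_val_and_op_to_idx boundary_val_and_op_to_idx_alt
  rw [hidx, pvFold_char bv vals 0 (none, none, none), hfe]
  simp only [Option.or_none, Option.none_or, zero_add, e1, e2, e3,
    Bool.false_eq_true, if_false, Bool.or_self]
  cases vals with
  | nil => simp [pvABwdGo, pvLastLt]
  | cons v t =>
    rcases h5 with h5 | ⟨hh, ht⟩
    · exact absurd h5 (List.cons_ne_nil v t)
    · have hv : PySem.Chars.strLt v.toList bv.toList = true := by simpa using hh
      have hll : pvLastLt t bv = none :=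
        (pvLastLt_eq_none_iff t bv).mpr (by simpa using ht)
      have hm1 : ((-1 : Int)) = ((t.length : Nat) : Int) - (((v :: t).length : Nat) : Int) := by
        simp
      rw [hm1, pvABwdGo_eq (v :: t) bv t.length (by simp) (v :: t).length (by simp)]
      have htail : (v :: t).tail.take t.length = t := by simp
      rw [htail, hll]
      simp only [pvLastLt, hll, hv, if_true, Option.map_some]
      intro hcontra
      simp at hcontra
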